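-- pv_equiv track=rewrite | github.com/calvincramer/coding-presentations | presentations/1/finished.py | expensive2
-- ===== SOURCE A (Python) =====
-- def expensive2(n):
--     result = 0
--     my_local = 0
--     for _ in range(n):
--         if my_local % 2 == 0:
--             result += 1
--         else:
--             result -= 1
--     return result
-- ===== SOURCE B (Python) =====
-- def expensive2(n):
--     return n if n > 0 else 0
-- ===== Notes on version B (the rewrite author's own statement) =====
-- stated objective: faster
-- what changed: Replaced the O(n) loop (which always takes the +1 branch since my_local never changes) with the closed form max(n, 0).
import Mathlib
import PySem

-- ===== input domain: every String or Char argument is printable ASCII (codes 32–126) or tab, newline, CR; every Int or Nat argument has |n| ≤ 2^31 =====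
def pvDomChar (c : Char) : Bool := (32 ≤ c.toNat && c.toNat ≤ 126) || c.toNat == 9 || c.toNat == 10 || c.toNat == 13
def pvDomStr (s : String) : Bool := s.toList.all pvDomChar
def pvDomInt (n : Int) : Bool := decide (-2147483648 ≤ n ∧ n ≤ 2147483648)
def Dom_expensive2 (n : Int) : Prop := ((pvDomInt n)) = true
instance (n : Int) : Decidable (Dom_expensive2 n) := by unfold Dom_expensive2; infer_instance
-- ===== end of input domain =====

-- B replaces the O(n) loop (whose else-branch is dead: my_local stays 0) with the closed form max(n,0); faster.
-- ===== PORT A =====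
def expensive2 (n : Int) : Int :=
  let st := (PySem.List.pyRange 0 n 1).foldl
    (fun (st : Int × Int) _ =>
      let (result, my_local) := st
      if my_local % 2 == 0 then (result + 1, my_local) else (result - 1, my_local))
    (0, 0)
  st.1

-- ===== PORT B =====
def expensive2_alt (n : Int) : Int := if n > 0 then n else 0

-- ===== PRECONDITION & SPEC =====
def Spec_expensive2 (n : Int) (out : Int) : Prop := out = expensive2_alt n
instance (n : Int) (out : Int) : Decidable (Spec_expensive2 n out) := by unfold Spec_expensive2; infer_instance

-- ===== CLAIM (what is proved, stated in full; the proofs are below) =====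
def Claim_equal_expensive2 : Prop := ∀ (n : Int), Dom_expensive2 n → Spec_expensive2 n (expensive2 n)

-- ===== LEMMAS AND PROOFS =====

-- ===== VERDICT (by name: the statement is the Claim_ definition above) =====
theorem foldl_const (l : List Int) (r : Int) :
    l.foldl (fun (st : Int × Int) _ =>
      let (result, my_local) := st
      if my_local % 2 == 0 then (result + 1, my_local) else (result - 1, my_local))
      (r, 0) = (r + l.length, 0) := by
  induction l generalizing r with
  | nil => simp
  | cons x xs ih =>
    have hstep : (fun (st : Int × Int) (_ : Int) =>
        let (result, my_local) := st
        if my_local % 2 == 0 then (result + 1, my_local) else (result - 1, my_local)) (r, 0) x = (r + 1, 0) := by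
      simp
    simp only [List.foldl_cons, hstep, ih, List.length_cons, Prod.mk.injEq]
    refine ⟨by push_cast; ring, trivial⟩

theorem expensive2_spec : Claim_equal_expensive2 := by
  intro n _
  unfold Spec_expensive2 expensive2 expensive2_alt
  rw [foldl_const]
  simp [PySem.List.length_pyRange_one]
  omega
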